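-- pv_equiv track=rewrite | github.com/Air2air/z-beam-generator | scripts/evaluation/e2e_content_evaluation.py | _evaluate_cultural_approach
-- ===== SOURCE A (Python) =====
-- def _evaluate_cultural_approach(content: str, country: str) -> int:
--     """Evaluate if the content approach matches cultural expectations."""
--     score = 0
--
--     if country == 'taiwan':
--         # Expect step-by-step, methodical approach
--         if 'step' in content.lower() or 'systematic' in content.lower():
--             score += 10
--         if len(content.split('.')) > 8:  # Multiple sentences = methodical
--             score += 10
--
--     elif country == 'italy':
--         # Expect precision and technical excellence
--         if 'precise' in content.lower() or 'optimal' in content.lower():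
--             score += 10
--         if 'innovation' in content.lower() or 'advanced' in content.lower():
--             score += 10
--
--     elif country == 'indonesia':
--         # Expect comprehensive technical detail
--         if len(content) > 800:  # Comprehensive = longer content
--             score += 10
--         if 'comprehensive' in content.lower() or 'detailed' in content.lower():
--             score += 10
--
--     elif country == 'united states':
--         # Expect conversational, groundbreaking tone
--         if 'breakthrough' in content.lower() or 'cutting-edge' in content.lower():
--             score += 10
--         if any(word in content.lower() for word in ['we', 'our', 'us']):
--             score += 5  # Conversational pronouns
--
--     return min(score, 20)
-- ===== SOURCE B (Python) =====
-- # One flat global rule table scanned in a single pass: each keyword rule names its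
-- # (country, keyword, slot); matching rules fire a slot, slots are deduplicated in a
-- # set (realising the 'or' between alternative keywords), and the score is the sum of
-- # the fired slots' weights.  No per-country branch chain, no running cap.
-- KEYWORD_RULES = [
--     ('taiwan', 'step', 0), ('taiwan', 'systematic', 0),
--     ('italy', 'precise', 0), ('italy', 'optimal', 0),
--     ('italy', 'innovation', 1), ('italy', 'advanced', 1),
--     ('indonesia', 'comprehensive', 1), ('indonesia', 'detailed', 1),
--     ('united states', 'breakthrough', 0), ('united states', 'cutting-edge', 0),
--     ('united states', 'we', 1), ('united states', 'our', 1), ('united states', 'us', 1),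
-- ]
--
--
-- def _evaluate_cultural_approach(content: str, country: str) -> int:
--     low = content.lower()
--     fired = {slot for ctry, kw, slot in KEYWORD_RULES if ctry == country and kw in low}
--     # the two structural (non-keyword) rules
--     if country == 'taiwan' and len(content.split('.')) > 8:
--         fired.add(1)
--     if country == 'indonesia' and len(content) > 800:
--         fired.add(0)
--     # at most two slots of weight <= 10 can fire, so no cap is needed
--     return sum(5 if (country, slot) == ('united states', 1) else 10 for slot in fired)
-- ===== Notes on version B (the rewrite author's own statement) =====
-- stated objective: alternative
-- what changed: Replaces the per-country if/elif chain by one flat (country, keyword, slot) rule table scanned in a single pass: matching keywords fire slots collected in a set (dedup replaces the boolean 'or'), score is the sum of fired-slot weights, and the running cap min(score,20) is dropped as provably unreachable.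
import Mathlib
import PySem

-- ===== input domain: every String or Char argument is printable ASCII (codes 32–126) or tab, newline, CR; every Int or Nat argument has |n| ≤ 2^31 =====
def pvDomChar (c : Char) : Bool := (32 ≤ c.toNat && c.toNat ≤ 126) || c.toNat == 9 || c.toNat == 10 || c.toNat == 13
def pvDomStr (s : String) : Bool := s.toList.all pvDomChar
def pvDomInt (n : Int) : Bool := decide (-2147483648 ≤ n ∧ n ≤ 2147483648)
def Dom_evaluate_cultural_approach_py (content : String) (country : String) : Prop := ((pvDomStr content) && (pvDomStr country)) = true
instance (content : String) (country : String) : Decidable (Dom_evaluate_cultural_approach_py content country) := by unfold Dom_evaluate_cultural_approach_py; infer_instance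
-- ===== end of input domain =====

-- B replaces A's per-country if/elif chain by a single pass over one flat (country, keyword, slot)
-- rule table: matching keywords fire slots collected in a set, the score is the sum of the fired
-- slots' weights, and the cap min(score, 20) is dropped as unreachable; objective: alternative.

-- ===== PORT A =====
def evaluate_cultural_approach_py (content : String) (country : String) : Int :=
  let score : Int := 0
  let score :=
    if country == "taiwan" then
      let score := if PySem.Str.isIn "step" (PySem.Str.lower content) || PySem.Str.isIn "systematic" (PySem.Str.lower content) then score + 10 else score
      let score := if (PySem.Chars.splitOn content.toList ['.']).length > 8 then score + 10 else score
      score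
    else if country == "italy" then
      let score := if PySem.Str.isIn "precise" (PySem.Str.lower content) || PySem.Str.isIn "optimal" (PySem.Str.lower content) then score + 10 else score
      let score := if PySem.Str.isIn "innovation" (PySem.Str.lower content) || PySem.Str.isIn "advanced" (PySem.Str.lower content) then score + 10 else score
      score
    else if country == "indonesia" then
      let score := if PySem.Str.len content > 800 then score + 10 else score
      let score := if PySem.Str.isIn "comprehensive" (PySem.Str.lower content) || PySem.Str.isIn "detailed" (PySem.Str.lower content) then score + 10 else score
      score
    else if country == "united states" then
      let score := if PySem.Str.isIn "breakthrough" (PySem.Str.lower content) || PySem.Str.isIn "cutting-edge" (PySem.Str.lower content) then score + 10 else score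
      let score := if ["we", "our", "us"].any (fun word => PySem.Str.isIn word (PySem.Str.lower content)) then score + 5 else score
      score
    else score
  min score 20

-- ===== PORT B =====
-- the flat rule table of Source B: (country, keyword, slot)
def pvKWRules : List (String × String × Int) :=
  [ ("taiwan", "step", 0), ("taiwan", "systematic", 0)
  , ("italy", "precise", 0), ("italy", "optimal", 0)
  , ("italy", "innovation", 1), ("italy", "advanced", 1)
  , ("indonesia", "comprehensive", 1), ("indonesia", "detailed", 1)
  , ("united states", "breakthrough", 0), ("united states", "cutting-edge", 0)
  , ("united states", "we", 1), ("united states", "our", 1), ("united states", "us", 1) ]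

def evaluate_cultural_approach_py_alt (content : String) (country : String) : Int :=
  let low := PySem.Str.lower content
  let fired : PySem.Set Int :=
    PySem.Set.ofList ((pvKWRules.filter (fun r => r.1 == country && PySem.Str.isIn r.2.1 low)).map (fun r => r.2.2))
  let fired := if country == "taiwan" && decide ((PySem.Chars.splitOn content.toList ['.']).length > 8) then PySem.Set.add fired 1 else fired
  let fired := if country == "indonesia" && decide (PySem.Str.len content > 800) then PySem.Set.add fired 0 else fired
  (fired.map (fun slot => if country == "united states" && slot == (1 : Int) then (5 : Int) else 10)).sum

-- ===== PRECONDITION & SPEC =====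
def Spec_evaluate_cultural_approach_py (content : String) (country : String) (out : Int) : Prop := out = evaluate_cultural_approach_py_alt content country
instance (content : String) (country : String) (out : Int) : Decidable (Spec_evaluate_cultural_approach_py content country out) := by unfold Spec_evaluate_cultural_approach_py; infer_instance

-- ===== CLAIM (what is proved, stated in full; the proofs are below) =====
def Claim_equal_evaluate_cultural_approach_py : Prop := ∀ (content : String) (country : String), Dom_evaluate_cultural_approach_py content country → Spec_evaluate_cultural_approach_py content country (evaluate_cultural_approach_py content country)

-- ===== LEMMAS AND PROOFS =====

-- ===== VERDICT (by name: the statement is the Claim_ definition above) =====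
theorem evaluate_cultural_approach_py_spec : Claim_equal_evaluate_cultural_approach_py := by
  intro content country _
  unfold Spec_evaluate_cultural_approach_py evaluate_cultural_approach_py evaluate_cultural_approach_py_alt pvKWRules
  by_cases h1 : country = "taiwan"
  · subst h1
    by_cases hA : PySem.Chars.isIn ['s','t','e','p'] (PySem.Chars.lower content.toList) = true <;>
    by_cases hB : PySem.Chars.isIn ['s','y','s','t','e','m','a','t','i','c'] (PySem.Chars.lower content.toList) = true <;>
    by_cases hC : (PySem.Chars.splitOn content.toList ['.']).length > 8 <;>
      (simp [hA, hB, hC, PySem.Set.add, PySem.Set.contains]; try decide)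
  by_cases h2 : country = "italy"
  · subst h2
    by_cases hA : PySem.Chars.isIn ['p','r','e','c','i','s','e'] (PySem.Chars.lower content.toList) = true <;>
    by_cases hB : PySem.Chars.isIn ['o','p','t','i','m','a','l'] (PySem.Chars.lower content.toList) = true <;>
    by_cases hC : PySem.Chars.isIn ['i','n','n','o','v','a','t','i','o','n'] (PySem.Chars.lower content.toList) = true <;>
    by_cases hD : PySem.Chars.isIn ['a','d','v','a','n','c','e','d'] (PySem.Chars.lower content.toList) = true <;>
      (simp [hA, hB, hC, hD]; try decide)
  by_cases h3 : country = "indonesia"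
  · subst h3
    by_cases hA : 800 < content.length <;>
    by_cases hB : PySem.Chars.isIn ['c','o','m','p','r','e','h','e','n','s','i','v','e'] (PySem.Chars.lower content.toList) = true <;>
    by_cases hC : PySem.Chars.isIn ['d','e','t','a','i','l','e','d'] (PySem.Chars.lower content.toList) = true <;>
      (simp [hA, hB, hC, PySem.Set.add, PySem.Set.contains]; try decide)
  by_cases h4 : country = "united states"
  · subst h4
    by_cases hA : PySem.Chars.isIn ['b','r','e','a','k','t','h','r','o','u','g','h'] (PySem.Chars.lower content.toList) = true <;>
    by_cases hB : PySem.Chars.isIn ['c','u','t','t','i','n','g','-','e','d','g','e'] (PySem.Chars.lower content.toList) = true <;>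
    by_cases hC : PySem.Chars.isIn ['w','e'] (PySem.Chars.lower content.toList) = true <;>
    by_cases hD : PySem.Chars.isIn ['o','u','r'] (PySem.Chars.lower content.toList) = true <;>
    by_cases hE : PySem.Chars.isIn ['u','s'] (PySem.Chars.lower content.toList) = true <;>
      (simp [hA, hB, hC, hD, hE]; try decide)
  · simp [h1, h2, h3, h4, Ne.symm h1, Ne.symm h2, Ne.symm h3, Ne.symm h4]
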